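-- pv_equiv track=rewrite | github.com/vovashko/python_bootcamp | prep_hashmaps/first_occ.py | first_occurance_in_string
-- ===== SOURCE A (Python) =====
-- def first_occurance_in_string(string):
--
-- 	char_dict = {}
--
-- 	for char in string:
-- 		if char not in char_dict:
-- 			char_dict[char] = 1
--
-- 	result = []
--
-- 	for char, count in char_dict.items():
-- 		result.append(char)
--
-- 	return ''.join(result)
-- ===== SOURCE B (Python) =====
-- def first_occurance_in_string(string):
-- 	# removal-based dedup: emit the next remaining character, then delete ALL of
-- 	# its later occurrences, so no seen-set/membership test is ever needed
-- 	out = []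
-- 	rest = list(string)
-- 	while rest:
-- 		c = rest[0]
-- 		out.append(c)
-- 		rest = [x for x in rest[1:] if x != c]
-- 	return ''.join(out)
-- ===== Notes on version B (the rewrite author's own statement) =====
-- stated objective: alternative
-- what changed: Replaced the seen-dict plus keys-collecting pass by a removal-based dedup loop: emit the first remaining character and delete all of its later occurrences from the rest, so no membership structure or seen-test exists at all.
import Mathlib
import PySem

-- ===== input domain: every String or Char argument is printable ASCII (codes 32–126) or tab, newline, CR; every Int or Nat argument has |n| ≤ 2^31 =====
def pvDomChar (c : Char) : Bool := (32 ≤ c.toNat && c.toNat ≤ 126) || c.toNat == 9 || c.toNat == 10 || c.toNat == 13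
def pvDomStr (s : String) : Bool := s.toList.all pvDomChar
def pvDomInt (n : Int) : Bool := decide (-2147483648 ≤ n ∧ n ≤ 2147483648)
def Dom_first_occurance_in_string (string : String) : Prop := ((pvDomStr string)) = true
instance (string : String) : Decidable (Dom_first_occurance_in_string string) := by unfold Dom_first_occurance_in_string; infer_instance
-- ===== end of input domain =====

-- B replaces A's seen-dict + keys pass by a removal-based dedup loop (emit head,
-- delete all its later occurrences); alternative algorithm, same return value.


-- ===== PORT A =====
def first_occurance_in_string (string : String) : String :=
  let char_dict : PySem.Dict Char Int :=
    string.toList.foldl (fun d char => if d.contains char then d else d.insert char 1)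
      PySem.Dict.empty
  let result : List Char :=
    char_dict.items.foldl (fun r p => r ++ [p.1]) []
  String.ofList result

-- ===== PORT B =====
-- B's while loop: take the head, append it to out, filter it out of the tail.
def pvAltLoop (rest : List Char) (out : List Char) : List Char :=
  match rest with
  | [] => out
  | c :: t => pvAltLoop (t.filter (fun x => x != c)) (out ++ [c])
termination_by rest.length
decreasing_by
  simp
  exact List.length_filter_le _ _

def first_occurance_in_string_alt (string : String) : String :=
  String.ofList (pvAltLoop string.toList [])

-- ===== PRECONDITION & SPEC =====
def Spec_first_occurance_in_string (string : String) (out : String) : Prop := out = first_occurance_in_string_alt string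
instance (string : String) (out : String) : Decidable (Spec_first_occurance_in_string string out) := by unfold Spec_first_occurance_in_string; infer_instance

-- ===== CLAIM (what is proved, stated in full; the proofs are below) =====
def Claim_equal_first_occurance_in_string : Prop := ∀ (string : String), Dom_first_occurance_in_string string → Spec_first_occurance_in_string string (first_occurance_in_string string)

-- ===== LEMMAS AND PROOFS =====

-- A's dict-building step
def pvStepA (d : PySem.Dict Char Int) (c : Char) : PySem.Dict Char Int :=
  if d.contains c then d else d.insert c 1

-- B's loop without the accumulator
def pvG (rest : List Char) : List Char :=
  match rest with
  | [] => []
  | c :: t => c :: pvG (t.filter (fun x => x != c))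
termination_by rest.length
decreasing_by
  simp
  exact List.length_filter_le _ _

theorem pvG_cons (c : Char) (t : List Char) :
    pvG (c :: t) = c :: pvG (t.filter (fun x => x != c)) := by
  simp [pvG]

theorem pvAltLoop_eq_G (rest out : List Char) :
    pvAltLoop rest out = out ++ pvG rest := by
  induction rest using pvG.induct generalizing out with
  | case1 => simp [pvAltLoop, pvG]
  | case2 c t ih =>
    simp only [List.unattach_filter, List.unattach_attach] at ih
    simp only [pvAltLoop, pvG]; rw [ih]; simp

theorem pvKeys_foldl (l : List Char) (d : PySem.Dict Char Int) :
    (l.foldl pvStepA d).keys = d.keys ++ pvG (l.filter (fun c => !d.contains c)) := by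
  induction l generalizing d with
  | nil => simp [pvG]
  | cons c t ih =>
    simp only [List.foldl_cons, List.filter_cons]
    by_cases hc : d.contains c
    · simp only [pvStepA, hc, if_true, Bool.not_true]
      simp [ih d]
    · have hcf : d.contains c = false := by simpa using hc
      simp only [pvStepA, hcf, Bool.false_eq_true, if_false, Bool.not_false, if_true]
      rw [ih (d.insert c 1)]
      rw [PySem.Dict.keys_insert_of_not_contains _ _ hcf]
      have hfilter : t.filter (fun x => !(d.insert c 1).contains x)
          = (t.filter (fun x => !d.contains x)).filter (fun x => x != c) := by
        rw [List.filter_filter]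
        apply List.filter_congr
        intro x _
        rw [PySem.Dict.contains_insert]
        cases hxc : x == c <;> cases hdx : d.contains x <;> simp [hxc, bne]
      rw [hfilter, pvG_cons]
      simp

-- ===== VERDICT (by name: the statement is the Claim_ definition above) =====
theorem first_occurance_in_string_spec : Claim_equal_first_occurance_in_string := by
  intro s _
  unfold Spec_first_occurance_in_string first_occurance_in_string first_occurance_in_string_alt
  simp only [PySem.List.foldl_append_singleton_eq_map, List.nil_append]
  have hfold : s.toList.foldl (fun d char => if d.contains char then d else d.insert char 1)
      PySem.Dict.empty = s.toList.foldl pvStepA PySem.Dict.empty := rfl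
  rw [hfold, pvAltLoop_eq_G, List.nil_append]
  have := pvKeys_foldl s.toList PySem.Dict.empty
  have hempty : s.toList.filter (fun c => !(PySem.Dict.empty : PySem.Dict Char Int).contains c)
      = s.toList := by
    apply List.filter_eq_self.mpr
    intro a _
    simp [PySem.Dict.empty, PySem.Dict.contains]
  rw [hempty] at this
  simp only [PySem.Dict.keys] at this ⊢
  rw [this]
  simp [PySem.Dict.empty]
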